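-- pv_equiv track=rewrite | github.com/akshay-greenlang/Code-V1_GreenLang | packs/ghg-accounting/PACK-048-assurance-prep/templates/regulatory_requirement_report.py | _md_compliance_matrix
-- ===== SOURCE A (Python) =====
-- from typing import Any, Dict, List, Optional
--
-- def _md_compliance_matrix(data: Dict[str, Any]) -> str:
--     """Render Markdown compliance status matrix."""
--     reqs = data.get("requirements", [])
--     if not reqs:
--         return ""
--     compliant = sum(1 for r in reqs if r.get("compliance_status") == "compliant")
--     gap = sum(1 for r in reqs if r.get("compliance_status") == "gap")
--     progress = sum(1 for r in reqs if r.get("compliance_status") == "in_progress")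
--     na = sum(1 for r in reqs if r.get("compliance_status") == "not_applicable")
--     lines = [
--         "## 2. Compliance Status Summary",
--         "",
--         "| Status | Count |",
--         "|--------|-------|",
--         f"| Compliant | {compliant} |",
--         f"| Gap | {gap} |",
--         f"| In Progress | {progress} |",
--         f"| Not Applicable | {na} |",
--         f"| **Total** | **{len(reqs)}** |",
--     ]
--     return "\n".join(lines)
-- ===== SOURCE B (Python) =====
-- def _md_compliance_matrix(data):
--     """Render Markdown compliance status matrix (single pass, table-driven rendering)."""
--     reqs = data.get("requirements", [])
--     if not reqs:
--         return ""
--     compliant = gap = progress = na = 0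
--     for r in reqs:
--         s = r.get("compliance_status")
--         compliant += s == "compliant"
--         gap += s == "gap"
--         progress += s == "in_progress"
--         na += s == "not_applicable"
--     rows = [("Compliant", compliant), ("Gap", gap),
--             ("In Progress", progress), ("Not Applicable", na)]
--     out = "## 2. Compliance Status Summary\n\n| Status | Count |\n|--------|-------|"
--     for label, cnt in rows:
--         out += f"\n| {label} | {cnt} |"
--     return out + f"\n| **Total** | **{len(reqs)}** |"
-- ===== Notes on version B (the rewrite author's own statement) =====
-- stated objective: alternative
-- what changed: A's four separate generator-expression scans (one per status) become a single pass over the requirements carrying four scalar accumulators (adding booleans), and A's literal nine-line list joined by '\n' becomes table-driven rendering: a (label,count) row table folded into the output string by concatenation.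
import Mathlib
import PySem

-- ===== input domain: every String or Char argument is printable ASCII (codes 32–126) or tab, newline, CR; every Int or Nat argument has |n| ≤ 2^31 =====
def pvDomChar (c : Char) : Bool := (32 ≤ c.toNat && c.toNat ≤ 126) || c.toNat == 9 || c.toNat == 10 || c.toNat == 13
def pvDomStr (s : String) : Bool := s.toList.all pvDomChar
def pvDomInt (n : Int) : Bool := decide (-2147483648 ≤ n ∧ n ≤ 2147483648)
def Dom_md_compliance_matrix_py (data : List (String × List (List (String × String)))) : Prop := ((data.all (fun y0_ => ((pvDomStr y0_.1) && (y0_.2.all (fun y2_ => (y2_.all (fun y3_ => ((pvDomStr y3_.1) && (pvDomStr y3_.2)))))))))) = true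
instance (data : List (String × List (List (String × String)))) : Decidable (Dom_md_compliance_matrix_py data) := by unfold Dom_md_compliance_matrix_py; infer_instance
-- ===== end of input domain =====

-- B replaces A's four separate counting scans with ONE pass carrying four scalar accumulators,
-- and replaces A's literal list of nine f-string lines with table-driven rendering (a row table
-- folded into the output string); objective: alternative decomposition, same cost.

-- ===== PORT A =====
def md_compliance_matrix_py (data : List (String × List (List (String × String)))) : String :=
  let reqs := (PySem.Dict.mk data).getD "requirements" []
  if reqs = [] then "" else
  let compliant := reqs.foldl (fun acc r => if (PySem.Dict.mk r).get? "compliance_status" == some "compliant" then acc + 1 else acc) (0 : Int)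
  let gap := reqs.foldl (fun acc r => if (PySem.Dict.mk r).get? "compliance_status" == some "gap" then acc + 1 else acc) (0 : Int)
  let progress := reqs.foldl (fun acc r => if (PySem.Dict.mk r).get? "compliance_status" == some "in_progress" then acc + 1 else acc) (0 : Int)
  let na := reqs.foldl (fun acc r => if (PySem.Dict.mk r).get? "compliance_status" == some "not_applicable" then acc + 1 else acc) (0 : Int)
  let lines := [
    "## 2. Compliance Status Summary",
    "",
    "| Status | Count |",
    "|--------|-------|",
    "| Compliant | " ++ PySem.Int.toStr compliant ++ " |",
    "| Gap | " ++ PySem.Int.toStr gap ++ " |",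
    "| In Progress | " ++ PySem.Int.toStr progress ++ " |",
    "| Not Applicable | " ++ PySem.Int.toStr na ++ " |",
    "| **Total** | **" ++ PySem.Int.toStr (reqs.length : Int) ++ "** |"]
  PySem.Str.join "\n" lines

-- ===== PORT B =====
def md_compliance_matrix_py_alt (data : List (String × List (List (String × String)))) : String :=
  let reqs := (PySem.Dict.mk data).getD "requirements" []
  if reqs = [] then "" else
  -- one pass, four scalar accumulators ('cnt += (s == v)' adds the boolean as 0/1)
  let t := reqs.foldl (fun (st : Int × Int × Int × Int) r =>
      let s := (PySem.Dict.mk r).get? "compliance_status"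
      (st.1 + (if s == some "compliant" then 1 else 0),
       st.2.1 + (if s == some "gap" then 1 else 0),
       st.2.2.1 + (if s == some "in_progress" then 1 else 0),
       st.2.2.2 + (if s == some "not_applicable" then 1 else 0))) ((0, 0, 0, 0) : Int × Int × Int × Int)
  let rows : List (String × Int) :=
    [("Compliant", t.1), ("Gap", t.2.1), ("In Progress", t.2.2.1), ("Not Applicable", t.2.2.2)]
  let out := "## 2. Compliance Status Summary\n\n| Status | Count |\n|--------|-------|"
  let out := rows.foldl (fun acc lc => acc ++ "\n| " ++ lc.1 ++ " | " ++ PySem.Int.toStr lc.2 ++ " |") out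
  out ++ "\n| **Total** | **" ++ PySem.Int.toStr (reqs.length : Int) ++ "** |"

-- ===== PRECONDITION & SPEC =====
def Spec_md_compliance_matrix_py (data : List (String × List (List (String × String)))) (out : String) : Prop := out = md_compliance_matrix_py_alt data
instance (data : List (String × List (List (String × String)))) (out : String) : Decidable (Spec_md_compliance_matrix_py data out) := by unfold Spec_md_compliance_matrix_py; infer_instance

-- ===== CLAIM =====
def Claim_equal_md_compliance_matrix_py : Prop := ∀ (data : List (String × List (List (String × String)))), Dom_md_compliance_matrix_py data → Spec_md_compliance_matrix_py data (md_compliance_matrix_py data)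

-- ===== LEMMAS AND PROOFS =====

-- B's single tuple-accumulator pass computes the same four counts as A's four separate passes.
theorem pv_tuple_fold (f : List (String × String) → Option String) :
    ∀ (l : List (List (String × String))) (a b c d : Int),
      l.foldl (fun (st : Int × Int × Int × Int) r =>
          let s := f r
          (st.1 + (if s == some "compliant" then 1 else 0),
           st.2.1 + (if s == some "gap" then 1 else 0),
           st.2.2.1 + (if s == some "in_progress" then 1 else 0),
           st.2.2.2 + (if s == some "not_applicable" then 1 else 0))) (a, b, c, d)
      = (l.foldl (fun acc r => if f r == some "compliant" then acc + 1 else acc) a,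
         l.foldl (fun acc r => if f r == some "gap" then acc + 1 else acc) b,
         l.foldl (fun acc r => if f r == some "in_progress" then acc + 1 else acc) c,
         l.foldl (fun acc r => if f r == some "not_applicable" then acc + 1 else acc) d) := by
  intro l
  induction l with
  | nil => intro a b c d; rfl
  | cons x xs ih =>
    intro a b c d
    simp only [List.foldl_cons, ih]
    split_ifs <;> simp

-- ===== VERDICT =====
theorem md_compliance_matrix_py_spec : Claim_equal_md_compliance_matrix_py := by
  intro data _
  unfold Spec_md_compliance_matrix_py md_compliance_matrix_py md_compliance_matrix_py_alt
  simp only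
  split
  · rfl
  · rw [pv_tuple_fold (fun r => (PySem.Dict.mk r).get? "compliance_status")]
    simp only [List.foldl_cons, List.foldl_nil]
    apply String.toList_inj.mp
    simp [PySem.Str.join, PySem.Chars.join, List.intercalate, List.intersperse]
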